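-- pv_equiv track=rewrite | github.com/Mohamed-Elwaei/Leetcode-Solutions | 3071. Minimum Operations to Write the Letter Y on a Grid.py | F
-- ===== SOURCE A (Python) =====
-- def F(grid, x, y):
--
--     n = len(grid)
--
--     operations = 0
--
--
--
--     for i in range(n):
--         for j in range(n):
--
--             if (i == j and i <= n//2) or (i + j == n-1 and i < j) or (j == n//2 and i >= n//2): # If the cell belongs to 'Y'
--                 if grid[i][j] != x: #If the cell belongs to 'Y' and is not equal to x.
--                     operations += 1
--             elif grid[i][j] != y: #If the cell does not belong to 'Y' and is not equal to y.
--                 operations += 1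
--
--     return operations
-- ===== SOURCE B (Python) =====
-- def F(grid, x, y):
--     n = len(grid)
--     total = 0
--     for row in grid:
--         for v in row[:n]:
--             if v != y:
--                 total += 1
--     if n == 0:
--         return total
--     h = n // 2
--     ycells = [(i, i) for i in range(h + 1)]
--     ycells += [(i, n - 1 - i) for i in range(n) if 2 * i < n - 1]
--     ycells += [(i, h) for i in range(h + 1, n)]
--     for (i, j) in ycells:
--         v = grid[i][j]
--         if v != y:
--             total -= 1
--         if v != x:
--             total += 1
--     return total
-- ===== Notes on version B (the rewrite author's own statement) =====
-- stated objective: alternative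
-- what changed: A tests every cell against the Y-condition inside one nested loop; B instead counts all cells != y with a flat branch-free double pass and then adjusts only the O(n) Y-cells, enumerated as three duplicate-free diagonal/anti-diagonal/column comprehensions.
import Mathlib
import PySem

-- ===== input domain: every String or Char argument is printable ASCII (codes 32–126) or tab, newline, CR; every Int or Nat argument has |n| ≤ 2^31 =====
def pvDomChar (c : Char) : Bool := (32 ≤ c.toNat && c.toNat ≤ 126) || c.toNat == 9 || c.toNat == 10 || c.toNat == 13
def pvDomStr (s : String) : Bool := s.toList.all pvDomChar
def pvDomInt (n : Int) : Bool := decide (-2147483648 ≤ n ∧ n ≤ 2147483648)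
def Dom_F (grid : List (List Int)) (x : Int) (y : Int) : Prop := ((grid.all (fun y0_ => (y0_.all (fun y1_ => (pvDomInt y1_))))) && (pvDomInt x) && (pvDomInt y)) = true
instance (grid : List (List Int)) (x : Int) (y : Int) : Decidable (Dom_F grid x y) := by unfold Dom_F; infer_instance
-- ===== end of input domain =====

-- ===== PORT A =====
-- A: one nested pass; each cell tested against the Y-condition, counting ≠x on Y-cells and ≠y elsewhere.
def F (grid : List (List Int)) (x : Int) (y : Int) : Int :=
  let n : Int := grid.length
  (PySem.List.pyRange 0 n 1).foldl (fun operations i =>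
    (PySem.List.pyRange 0 n 1).foldl (fun operations j =>
      if (i = j ∧ i ≤ PySem.Int.floordiv n 2) ∨ (i + j = n - 1 ∧ i < j) ∨
          (j = PySem.Int.floordiv n 2 ∧ i ≥ PySem.Int.floordiv n 2) then
        (if PySem.List.pyGetD (PySem.List.pyGetD grid i []) j 0 ≠ x then operations + 1 else operations)
      else
        (if PySem.List.pyGetD (PySem.List.pyGetD grid i []) j 0 ≠ y then operations + 1 else operations))
      operations) 0

-- ===== PORT B =====
-- B: first count every cell ≠ y with a flat double loop (no Y test), then enumerate the
-- Y-cells as three duplicate-free comprehensions and adjust each once (-(≠y) +(≠x)).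
def F_alt (grid : List (List Int)) (x : Int) (y : Int) : Int :=
  let n : Int := grid.length
  let total := grid.foldl (fun total row =>
    (PySem.List.slice row none (some n)).foldl (fun total v =>
      if v ≠ y then total + 1 else total) total) 0
  let h := PySem.Int.floordiv n 2
  let ycells :=
    ((PySem.List.pyRange 0 n 1).filter (fun i => i ≤ h)).map (fun i => (i, i))
    ++ ((PySem.List.pyRange 0 n 1).filter (fun i => 2 * i < n - 1)).map (fun i => (i, n - 1 - i))
    ++ ((PySem.List.pyRange 0 n 1).filter (fun i => i > h)).map (fun i => (i, h))
  ycells.foldl (fun total p =>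
    let v := PySem.List.pyGetD (PySem.List.pyGetD grid p.1 []) p.2 0
    let total := if v ≠ y then total - 1 else total
    if v ≠ x then total + 1 else total) total

-- ===== PRECONDITION & SPEC =====
-- Pre_F: every row must have at least n = len(grid) entries; on any shorter row the Python A
-- raises IndexError at grid[i][j] (A returns normally on exactly the grids admitted here).
def Pre_F (grid : List (List Int)) (x : Int) (y : Int) : Prop :=
  ∀ row ∈ grid, grid.length ≤ row.length
instance (grid : List (List Int)) (x : Int) (y : Int) : Decidable (Pre_F grid x y) := by
  unfold Pre_F; infer_instance
def pvWitness_F : List (List Int) × Int × Int := ([[1, 2], [0, 1]], 1, 0)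
def Spec_F (grid : List (List Int)) (x : Int) (y : Int) (out : Int) : Prop := out = F_alt grid x y
instance (grid : List (List Int)) (x : Int) (y : Int) (out : Int) : Decidable (Spec_F grid x y out) := by
  unfold Spec_F; infer_instance

-- ===== CLAIM (what is proved, stated in full; the proofs are below) =====
def Claim_equal_F : Prop := ∀ (grid : List (List Int)) (x : Int) (y : Int),
  Dom_F grid x y → Pre_F grid x y → Spec_F grid x y (F grid x y)

-- ===== LEMMAS AND PROOFS =====

-- the cell value both ports read at (i, j), and the 0/1 mismatch indicator
def pvCell (grid : List (List Int)) (i j : Nat) : Int := (grid.getD i []).getD j 0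
def pvInd (v b : Int) : Int := if v ≠ b then 1 else 0
-- per-cell contribution of A (Nat-index form of A's condition)
def pvA (grid : List (List Int)) (x y : Int) (i j : Nat) : Int :=
  if (i = j ∧ i ≤ grid.length / 2) ∨ (i + j + 1 = grid.length ∧ i < j) ∨
      (j = grid.length / 2 ∧ grid.length / 2 ≤ i) then
    pvInd (pvCell grid i j) x
  else
    pvInd (pvCell grid i j) y
-- Y-cell adjustment
def pvD (grid : List (List Int)) (x y : Int) (i j : Nat) : Int :=
  pvInd (pvCell grid i j) x - pvInd (pvCell grid i j) y

-- a fold whose step adds g x is init + sum of g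
theorem pv_foldl_step {a : Type} (l : List a) (f : Int → a → Int) (g : a → Int) (init : Int)
    (h : ∀ acc x, f acc x = acc + g x) : l.foldl f init = init + (l.map g).sum := by
  rw [PySem.List.foldl_congr_mem l f (fun acc x => acc + g x) init (fun acc x _ => h acc x)]
  exact PySem.List.foldl_add l g init

-- sum over a filtered list = sum of the guarded summand
theorem pv_sum_filter {a : Type} (l : List a) (p : a → Bool) (g : a → Int) :
    ((l.filter p).map g).sum = (l.map (fun i => if p i then g i else 0)).sum := by
  induction l with
  | nil => rfl
  | cons hd tl ih => by_cases h : p hd <;> simp [h, ih]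

-- sum over range n of a single-point summand
theorem pv_sum_range_single (n k : Nat) (g : Nat → Int) (hk : k < n) :
    ((List.range n).map (fun j => if j = k then g j else 0)).sum = g k := by
  induction n with
  | zero => omega
  | succ m ih =>
    rw [List.range_succ]
    by_cases h : k = m
    · subst h
      have : ((List.range k).map (fun j => if j = k then g j else 0)).sum = 0 := by
        apply List.sum_eq_zero
        intro v hv
        simp only [List.mem_map, List.mem_range] at hv
        obtain ⟨j, hj, rfl⟩ := hv
        simp [Nat.ne_of_lt hj]
      simp [this]
    · have hk' : k < m := by omega
      simp only [List.map_append, List.sum_append, List.map_cons, List.map_nil,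
        List.sum_cons, List.sum_nil]
      rw [ih hk']
      simp only [if_neg (fun hh : m = k => h hh.symm)]
      ring

-- a list is the range-indexed map of its getD
theorem pv_list_eq_map_range {a : Type} (l : List a) (d : a) :
    l = (List.range l.length).map (fun i => l.getD i d) := by
  apply List.ext_getElem
  · simp
  · intro i h1 h2
    simp [List.getD_eq_getElem?_getD, (by simpa using h2 : i < l.length)]

-- A's nested loop evaluates to the double sum of pvA
theorem pvA_step (grid : List (List Int)) (x y acc : Int) (i j : Nat) :
    (if ((i:Int) = (j:Int) ∧ (i:Int) ≤ PySem.Int.floordiv (grid.length:Int) 2) ∨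
        ((i:Int) + (j:Int) = (grid.length:Int) - 1 ∧ (i:Int) < (j:Int)) ∨
        ((j:Int) = PySem.Int.floordiv (grid.length:Int) 2 ∧ (i:Int) ≥ PySem.Int.floordiv (grid.length:Int) 2) then
      (if PySem.List.pyGetD (PySem.List.pyGetD grid (i:Int) []) (j:Int) 0 ≠ x then acc + 1 else acc)
    else
      (if PySem.List.pyGetD (PySem.List.pyGetD grid (i:Int) []) (j:Int) 0 ≠ y then acc + 1 else acc))
    = acc + pvA grid x y i j := by
  have hfd : PySem.Int.floordiv (grid.length:Int) 2 = ((grid.length / 2 : Nat) : Int) := by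
    exact_mod_cast PySem.Int.floordiv_natCast grid.length 2
  simp only [hfd, PySem.List.pyGetD_natCast]
  have hc : (((i:Int) = (j:Int) ∧ (i:Int) ≤ ((grid.length / 2 : Nat) : Int)) ∨
      ((i:Int) + (j:Int) = (grid.length:Int) - 1 ∧ (i:Int) < (j:Int)) ∨
      ((j:Int) = ((grid.length / 2 : Nat) : Int) ∧ (i:Int) ≥ ((grid.length / 2 : Nat) : Int))) ↔
      ((i = j ∧ i ≤ grid.length / 2) ∨ (i + j + 1 = grid.length ∧ i < j) ∨
        (j = grid.length / 2 ∧ grid.length / 2 ≤ i)) := by omega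
  rw [if_congr hc rfl rfl]
  unfold pvA pvCell pvInd
  split_ifs <;> ring
theorem pvA_eval (grid : List (List Int)) (x y : Int) :
    F grid x y = ((List.range grid.length).map (fun i =>
      ((List.range grid.length).map (fun j => pvA grid x y i j)).sum)).sum := by
  unfold F
  dsimp only
  rw [PySem.List.pyRange_zero_natCast, List.foldl_map,
    pv_foldl_step _ _ (fun i => ((List.range grid.length).map (fun j => pvA grid x y i j)).sum) 0
      (fun acc i => by
        rw [List.foldl_map,
          pv_foldl_step _ _ (fun j => pvA grid x y i j) acc
            (fun acc' j => pvA_step grid x y acc' i j)])]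
  ring

-- take n of a long-enough row, as a range-indexed map
theorem pv_take_eq_map_range (row : List Int) (n : Nat) (h : n ≤ row.length) :
    row.take n = (List.range n).map (fun j => row.getD j 0) := by
  apply List.ext_getElem
  · simp [h]
  · intro k h1 h2
    have hk : k < n := by simpa using h2
    have hk' : k < row.length := by omega
    simp [List.getElem_take, List.getD_eq_getElem?_getD, hk']
theorem pv_sum_map_eq_range {a : Type} (l : List a) (d : a) (f : a → Int) :
    (l.map f).sum = ((List.range l.length).map (fun i => f (l.getD i d))).sum := by
  conv_lhs => rw [pv_list_eq_map_range l d]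
  rw [List.map_map]
  rfl

-- B evaluates to the flat ≠y count plus the three arm adjustments
theorem pvB_eval (grid : List (List Int)) (x y : Int)
    (hpre : ∀ row ∈ grid, grid.length ≤ row.length) :
    F_alt grid x y =
      ((List.range grid.length).map (fun i =>
        ((List.range grid.length).map (fun j => pvInd (pvCell grid i j) y)).sum)).sum
      + ((List.range grid.length).map (fun i =>
          if i ≤ grid.length / 2 then pvD grid x y i i else 0)).sum
      + ((List.range grid.length).map (fun i =>
          if 2 * i + 1 < grid.length then pvD grid x y i (grid.length - 1 - i) else 0)).sum
      + ((List.range grid.length).map (fun i =>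
          if grid.length / 2 < i then pvD grid x y i (grid.length / 2) else 0)).sum := by
  have hfd : PySem.Int.floordiv (grid.length:Int) 2 = ((grid.length / 2 : Nat) : Int) := by
    exact_mod_cast PySem.Int.floordiv_natCast grid.length 2
  unfold F_alt
  dsimp only
  rw [pv_foldl_step grid _
      (fun row => (((PySem.List.slice row none (some (grid.length:Int))).map (fun v => pvInd v y)).sum)) 0
      (fun acc row => by
        rw [pv_foldl_step _ _ (fun v => pvInd v y) acc
          (fun a v => by unfold pvInd; split_ifs <;> simp_all <;> ring)])]
  rw [pv_foldl_step _ _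
      (fun p : Int × Int => pvInd (PySem.List.pyGetD (PySem.List.pyGetD grid p.1 []) p.2 0) x
        - pvInd (PySem.List.pyGetD (PySem.List.pyGetD grid p.1 []) p.2 0) y) _
      (fun acc p => by dsimp only; unfold pvInd; split_ifs <;> simp_all <;> ring)]
  simp only [PySem.List.slice_to_natCast]
  rw [pv_sum_map_eq_range grid []]
  have htot : ((List.range grid.length).map
      (fun i => (((grid.getD i []).take grid.length).map (fun v => pvInd v y)).sum)).sum
      = ((List.range grid.length).map (fun i =>
          ((List.range grid.length).map (fun j => pvInd (pvCell grid i j) y)).sum)).sum := by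
    apply congrArg
    apply List.map_congr_left
    intro i hi
    have hi' : i < grid.length := by simpa using hi
    have hrow : grid.length ≤ (grid.getD i []).length := by
      apply hpre
      have := List.getElem_mem (l := grid) (by omega : i < grid.length)
      simpa [List.getD_eq_getElem?_getD, List.getElem?_eq_getElem, hi'] using this
    rw [pv_take_eq_map_range _ _ hrow, List.map_map]
    rfl
  rw [htot]
  rw [PySem.List.pyRange_zero_natCast]
  simp only [List.map_append, List.sum_append, List.filter_map, List.map_map]
  rw [pv_sum_filter, pv_sum_filter, pv_sum_filter]
  simp only [Function.comp]
  rw [zero_add]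
  have hb1 : ∀ i ∈ List.range grid.length,
      (if decide ((i:Int) ≤ PySem.Int.floordiv (grid.length:Int) 2) = true then
        pvInd (PySem.List.pyGetD (PySem.List.pyGetD grid (i:Int) []) (i:Int) 0) x -
          pvInd (PySem.List.pyGetD (PySem.List.pyGetD grid (i:Int) []) (i:Int) 0) y else 0)
      = (if i ≤ grid.length / 2 then pvD grid x y i i else 0) := by
    intro i _
    simp only [hfd, PySem.List.pyGetD_natCast, decide_eq_true_eq, Nat.cast_le]
    unfold pvD pvCell
    rfl
  have hb2 : ∀ i ∈ List.range grid.length,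
      (if decide (2 * (i:Int) < (grid.length:Int) - 1) = true then
        pvInd (PySem.List.pyGetD (PySem.List.pyGetD grid (i:Int) []) ((grid.length:Int) - 1 - (i:Int)) 0) x -
          pvInd (PySem.List.pyGetD (PySem.List.pyGetD grid (i:Int) []) ((grid.length:Int) - 1 - (i:Int)) 0) y else 0)
      = (if 2 * i + 1 < grid.length then pvD grid x y i (grid.length - 1 - i) else 0) := by
    intro i _
    by_cases hc : 2 * i + 1 < grid.length
    · have hc' : 2 * (i:Int) < (grid.length:Int) - 1 := by omega
      have hj : ((grid.length:Int) - 1 - (i:Int)) = ((grid.length - 1 - i : Nat) : Int) := by omega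
      simp only [hj, PySem.List.pyGetD_natCast, hc, hc', decide_eq_true_eq, if_pos]
      unfold pvD pvCell
      rfl
    · have hc' : ¬ (2 * (i:Int) < (grid.length:Int) - 1) := by omega
      simp [hc, hc']
  have hb3 : ∀ i ∈ List.range grid.length,
      (if decide ((i:Int) > PySem.Int.floordiv (grid.length:Int) 2) = true then
        pvInd (PySem.List.pyGetD (PySem.List.pyGetD grid (i:Int) []) (PySem.Int.floordiv (grid.length:Int) 2) 0) x -
          pvInd (PySem.List.pyGetD (PySem.List.pyGetD grid (i:Int) []) (PySem.Int.floordiv (grid.length:Int) 2) 0) y else 0)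
      = (if grid.length / 2 < i then pvD grid x y i (grid.length / 2) else 0) := by
    intro i _
    simp only [hfd, PySem.List.pyGetD_natCast, decide_eq_true_eq, gt_iff_lt, Nat.cast_lt]
    unfold pvD pvCell
    rfl
  rw [List.map_congr_left hb1, List.map_congr_left hb2, List.map_congr_left hb3]
  ring

-- guarded single-point sum
theorem pv_sum_range_single_guard (n k : Nat) (C : Prop) [Decidable C] (g : Nat → Int) (hk : k < n) :
    ((List.range n).map (fun j => if j = k ∧ C then g j else 0)).sum = if C then g k else 0 := by
  by_cases hC : C
  · simp only [hC, and_true, if_true]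
    exact pv_sum_range_single n k g hk
  · simp [hC]

-- ===== VERDICT (by name: the statement is the Claim_ definition above) =====
theorem F_spec : Claim_equal_F := by
  intro grid x y _ hpre
  unfold Spec_F
  rw [pvA_eval, pvB_eval grid x y hpre]
  rw [← PySem.List.sum_map_add_int, ← PySem.List.sum_map_add_int, ← PySem.List.sum_map_add_int]
  apply congrArg
  apply List.map_congr_left
  intro i hi
  have hi' : i < grid.length := by simpa using hi
  have hpoint : ∀ j ∈ List.range grid.length, pvA grid x y i j =
      pvInd (pvCell grid i j) y
      + (if j = i ∧ i ≤ grid.length / 2 then pvD grid x y i j else 0)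
      + (if j = grid.length - 1 - i ∧ 2 * i + 1 < grid.length then pvD grid x y i j else 0)
      + (if j = grid.length / 2 ∧ grid.length / 2 < i then pvD grid x y i j else 0) := by
    intro j hj
    have hj' : j < grid.length := by simpa using hj
    unfold pvA pvD
    split_ifs <;> first | omega | ring
  rw [List.map_congr_left hpoint]
  rw [PySem.List.sum_map_add_int, PySem.List.sum_map_add_int, PySem.List.sum_map_add_int]
  rw [pv_sum_range_single_guard _ i _ _ hi',
    pv_sum_range_single_guard _ (grid.length - 1 - i) _ _ (by omega),
    pv_sum_range_single_guard _ (grid.length / 2) _ _ (by omega)]
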